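-- pv_equiv track=rewrite | github.com/hossainel/spog | basic/CPTTRN3 - Character Patterns (Act 3).py | chessBoard
-- ===== SOURCE A (Python) =====
-- def chessBoard(h,w):
--     board = ''
--     for r in range(h*3+1):
--         for c in range(w*3+1):
--             if r%3==0 or c%3==0 or (w*3)==c or (h*3)==r: cell = '*'
--             else: cell = '.'
--             board = board + cell
--         board = board + '\n'
--     return board
-- ===== SOURCE B (Python) =====
-- def chessBoard(h, w):
--     rows = h * 3 + 1
--     if rows <= 0:
--         return ''
--     full = '*' * (w * 3 + 1)
--     patt = ''.join('*' if c % 3 == 0 else '.' for c in range(w * 3 + 1))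
--     return ''.join((full if r % 3 == 0 else patt) + '\n' for r in range(rows))
-- ===== Notes on version B (the rewrite author's own statement) =====
-- stated objective: simpler
-- what changed: B builds the two row templates (full '*' row and the '*..'-pattern row) once, returns '' early when there are no rows, and joins one template per row, replacing A's per-character nested loops; the redundant edge conditions (c==w*3, r==h*3) drop out because those indices are multiples of 3.
import Mathlib
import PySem

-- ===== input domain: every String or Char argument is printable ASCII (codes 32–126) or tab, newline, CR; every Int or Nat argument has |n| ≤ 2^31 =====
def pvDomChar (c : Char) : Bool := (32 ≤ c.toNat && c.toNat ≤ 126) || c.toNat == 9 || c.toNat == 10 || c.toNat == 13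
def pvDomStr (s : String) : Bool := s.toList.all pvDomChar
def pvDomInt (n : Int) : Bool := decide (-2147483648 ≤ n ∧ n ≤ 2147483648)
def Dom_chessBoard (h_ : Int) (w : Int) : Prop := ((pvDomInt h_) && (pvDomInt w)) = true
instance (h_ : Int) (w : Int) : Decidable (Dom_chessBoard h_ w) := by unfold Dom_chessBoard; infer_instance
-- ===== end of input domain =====

-- B builds the two row templates once and joins per-row selections instead of A's
-- character-by-character nested loops (objective: simpler decomposition, same result).

-- ===== PORT A =====
def chessBoard (h_ : Int) (w : Int) : String :=
  (PySem.List.pyRange 0 (h_*3+1) 1).foldl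
    (fun board r =>
      ((PySem.List.pyRange 0 (w*3+1) 1).foldl
        (fun board c =>
          board ++ (if PySem.Int.mod r 3 = 0 ∨ PySem.Int.mod c 3 = 0 ∨ w*3 = c ∨ h_*3 = r
                    then "*" else "."))
        board)
      ++ "\n")
    ""

-- ===== PORT B =====
-- '*' * (w*3+1) is String.ofList (List.replicate (w*3+1).toNat '*') — exact, incl. nonpositive counts.
def chessBoard_alt (h_ : Int) (w : Int) : String :=
  if h_*3+1 ≤ 0 then "" else
  let full : String := String.ofList (List.replicate (w*3+1).toNat '*')
  let patt : String := PySem.Str.join ""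
    ((PySem.List.pyRange 0 (w*3+1) 1).map
      (fun c => if PySem.Int.mod c 3 = 0 then "*" else "."))
  PySem.Str.join ""
    ((PySem.List.pyRange 0 (h_*3+1) 1).map
      (fun r => (if PySem.Int.mod r 3 = 0 then full else patt) ++ "\n"))

-- ===== PRECONDITION & SPEC =====
def Spec_chessBoard (h_ : Int) (w : Int) (out : String) : Prop := out = chessBoard_alt h_ w
instance (h_ : Int) (w : Int) (out : String) : Decidable (Spec_chessBoard h_ w out) := by unfold Spec_chessBoard; infer_instance

-- ===== CLAIM (what is proved, stated in full; the proofs are below) =====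
def Claim_equal_chessBoard : Prop := ∀ (h_ : Int) (w : Int), Dom_chessBoard h_ w → Spec_chessBoard h_ w (chessBoard h_ w)

-- ===== LEMMAS AND PROOFS =====

lemma pvJoinNilFlatten : ∀ (l : List (List Char)), PySem.Chars.join [] l = l.flatten := by
  intro l
  induction l with
  | nil => simp [PySem.Chars.join_nil]
  | cons p rest ih =>
    cases rest with
    | nil => simp [PySem.Chars.join_singleton]
    | cons q r => rw [PySem.Chars.join_cons_cons]; simp_all

lemma pvFoldlStr (g : String → Int → String) (gl : Int → List Char)
    (hg : ∀ (b : String) (r : Int), (g b r).toList = b.toList ++ gl r) :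
    ∀ (xs : List Int) (b : String),
      (xs.foldl g b).toList = b.toList ++ (xs.map gl).flatten := by
  intro xs
  induction xs with
  | nil => intro b; simp
  | cons x xs ih => intro b; simp [List.foldl_cons, ih, hg]

lemma pvFlattenConst (x : Char) : ∀ (l : List Int),
    (l.map (fun _ => [x])).flatten = List.replicate l.length x := by
  intro l
  induction l with
  | nil => simp
  | cons a l ih => simp [List.replicate_succ]

lemma pvMod3Mul (k : Int) : PySem.Int.mod (k*3) 3 = 0 := by
  rw [PySem.Int.mod_eq_zero_iff_dvd]; exact ⟨k, by ring⟩

lemma pvInner (h_ w r : Int) (b : String) :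
    (((PySem.List.pyRange 0 (w*3+1) 1).foldl
      (fun board c =>
        board ++ (if PySem.Int.mod r 3 = 0 ∨ PySem.Int.mod c 3 = 0 ∨ w*3 = c ∨ h_*3 = r
                  then "*" else ".")) b)).toList
    = b.toList ++ ((PySem.List.pyRange 0 (w*3+1) 1).map
        (fun c => (if PySem.Int.mod r 3 = 0 ∨ PySem.Int.mod c 3 = 0 ∨ w*3 = c ∨ h_*3 = r
                   then ("*" : String) else ".").toList)).flatten :=
  pvFoldlStr _ _ (fun b c => by simp) _ b

lemma pvOuter (h_ w : Int) :
    (chessBoard h_ w).toList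
    = ((PySem.List.pyRange 0 (h_*3+1) 1).map (fun r =>
        ((PySem.List.pyRange 0 (w*3+1) 1).map
          (fun c => (if PySem.Int.mod r 3 = 0 ∨ PySem.Int.mod c 3 = 0 ∨ w*3 = c ∨ h_*3 = r
                     then ("*" : String) else ".").toList)).flatten ++ ['\n'])).flatten := by
  unfold chessBoard
  have h := pvFoldlStr
    (fun board r =>
      ((PySem.List.pyRange 0 (w*3+1) 1).foldl
        (fun board c =>
          board ++ (if PySem.Int.mod r 3 = 0 ∨ PySem.Int.mod c 3 = 0 ∨ w*3 = c ∨ h_*3 = r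
                    then "*" else "."))
        board)
      ++ "\n")
    (fun r =>
      ((PySem.List.pyRange 0 (w*3+1) 1).map
        (fun c => (if PySem.Int.mod r 3 = 0 ∨ PySem.Int.mod c 3 = 0 ∨ w*3 = c ∨ h_*3 = r
                   then ("*" : String) else ".").toList)).flatten ++ ['\n'])
    (fun b r => by rw [String.toList_append, pvInner h_ w r b]; simp)
    (PySem.List.pyRange 0 (h_*3+1) 1) ""
  simpa using h

lemma pvAltList (h_ w : Int) (hrows : ¬ (h_*3+1 ≤ 0)) :
    (chessBoard_alt h_ w).toList
    = ((PySem.List.pyRange 0 (h_*3+1) 1).map (fun r =>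
        (if PySem.Int.mod r 3 = 0
          then String.ofList (List.replicate (w*3+1).toNat '*')
          else PySem.Str.join ""
            ((PySem.List.pyRange 0 (w*3+1) 1).map
              (fun c => if PySem.Int.mod c 3 = 0 then "*" else "."))).toList ++ ['\n'])).flatten := by
  unfold chessBoard_alt
  rw [if_neg hrows, PySem.Str.toList_join, List.map_map]
  have he : ("" : String).toList = [] := rfl
  rw [he, pvJoinNilFlatten]
  apply congrArg List.flatten
  apply List.map_congr_left
  intro r _
  simp [String.toList_append]

lemma pvRow (h_ w r : Int) :
    ((PySem.List.pyRange 0 (w*3+1) 1).map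
      (fun c => (if PySem.Int.mod r 3 = 0 ∨ PySem.Int.mod c 3 = 0 ∨ w*3 = c ∨ h_*3 = r
                 then ("*" : String) else ".").toList)).flatten
    = (if PySem.Int.mod r 3 = 0
        then String.ofList (List.replicate (w*3+1).toNat '*')
        else PySem.Str.join ""
          ((PySem.List.pyRange 0 (w*3+1) 1).map
            (fun c => if PySem.Int.mod c 3 = 0 then "*" else "."))).toList := by
  by_cases hr : PySem.Int.mod r 3 = 0
  · rw [if_pos hr]
    have hf : (fun c : Int =>
        (if PySem.Int.mod r 3 = 0 ∨ PySem.Int.mod c 3 = 0 ∨ w*3 = c ∨ h_*3 = r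
         then ("*" : String) else ".").toList) = fun _ => ['*'] := by
      funext c; rw [if_pos (Or.inl hr)]; rfl
    rw [hf, pvFlattenConst, PySem.List.length_pyRange_one]
    simp [String.toList_ofList]
  · have hhr : ¬ (h_*3 = r) := fun h => hr (h ▸ pvMod3Mul h_)
    rw [if_neg hr, PySem.Str.toList_join, List.map_map]
    have he : ("" : String).toList = [] := rfl
    rw [he, pvJoinNilFlatten]
    apply congrArg List.flatten
    apply List.map_congr_left
    intro c _
    simp only [Function.comp_apply]
    by_cases hc : PySem.Int.mod c 3 = 0
    · rw [if_pos (Or.inr (Or.inl hc)), if_pos hc]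
    · have hwc : ¬ (w*3 = c) := fun h => hc (h ▸ pvMod3Mul w)
      rw [if_neg (by tauto), if_neg hc]

-- ===== VERDICT (by name: the statement is the Claim_ definition above) =====
theorem chessBoard_spec : Claim_equal_chessBoard := by
  intro h_ w _
  show chessBoard h_ w = chessBoard_alt h_ w
  by_cases hrows : h_*3+1 ≤ 0
  · unfold chessBoard chessBoard_alt
    rw [if_pos hrows, PySem.List.pyRange_one_eq_nil hrows]
    rfl
  have h : (chessBoard h_ w).toList = (chessBoard_alt h_ w).toList := by
    rw [pvOuter, pvAltList h_ w hrows]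
    apply congrArg List.flatten
    apply List.map_congr_left
    intro r _
    rw [pvRow h_ w r]
  exact String.toList_inj.mp h
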